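-- pv_equiv track=rewrite | github.com/yangpings/DATASCI-217 | Midterm_1/bioinformatics_project/scripts/find_cutsites.py | find_distant_pairs
-- ===== SOURCE A (Python) =====
-- def find_distant_pairs(positions, min_distance=80000, max_distance=120000):
--     #initialize pairs list
--     pairs = []
--     num_positions = len(positions)
--     #find pairs distantly in range 80000-120000
--     for i in range(num_positions):
--         for j in range(i + 1, num_positions):
--             distance = positions[j] - positions[i]
--             if min_distance <= distance <= max_distance:
--                 pairs.append((positions[i], positions[j]))
--     return pairs
-- ===== SOURCE B (Python) =====
-- def find_distant_pairs(positions, min_distance=80000, max_distance=120000):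
--     # index-free suffix sweep: peel the head, pair it with the matching tail elements
--     pairs = []
--     rest = list(positions)
--     while rest:
--         p, rest = rest[0], rest[1:]
--         pairs += [(p, q) for q in rest if min_distance <= q - p <= max_distance]
--     return pairs
-- ===== Notes on version B (the rewrite author's own statement) =====
-- stated objective: alternative
-- what changed: replaces the index-based double for-loop over range(len) with an index-free suffix sweep that peels the head and pairs it with a filtered comprehension over the remaining tail
import Mathlib
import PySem

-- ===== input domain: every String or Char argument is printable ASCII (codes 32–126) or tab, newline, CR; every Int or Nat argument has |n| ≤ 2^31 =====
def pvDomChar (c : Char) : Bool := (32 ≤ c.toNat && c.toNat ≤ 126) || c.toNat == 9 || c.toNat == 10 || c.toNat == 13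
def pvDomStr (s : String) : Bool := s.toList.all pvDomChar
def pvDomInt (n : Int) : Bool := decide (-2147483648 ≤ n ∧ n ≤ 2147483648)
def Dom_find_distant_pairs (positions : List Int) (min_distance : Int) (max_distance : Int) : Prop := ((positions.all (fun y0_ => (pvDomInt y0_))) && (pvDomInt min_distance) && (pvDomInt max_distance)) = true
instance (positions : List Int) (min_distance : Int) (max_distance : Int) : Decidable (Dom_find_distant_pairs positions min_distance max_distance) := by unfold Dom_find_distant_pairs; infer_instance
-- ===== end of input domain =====

-- B replaces A's index-based double for-loop with an index-free suffix sweep (peel the head,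
-- pair it with the filtered tail); same O(n^2) cost, alternative decomposition. Return values proved equal.

-- ===== PORT A =====
def find_distant_pairs (positions : List Int) (min_distance : Int) (max_distance : Int) : List (Int × Int) :=
  -- pairs = []; for i in range(len): for j in range(i+1, len): ...
  (PySem.List.pyRange 0 (positions.length : Int) 1).foldl (fun pairs i =>
    (PySem.List.pyRange (i + 1) (positions.length : Int) 1).foldl (fun pairs j =>
      -- distance = positions[j] - positions[i], inlined
      if min_distance ≤ PySem.List.pyGetD positions j 0 - PySem.List.pyGetD positions i 0 ∧
         PySem.List.pyGetD positions j 0 - PySem.List.pyGetD positions i 0 ≤ max_distance then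
        pairs ++ [(PySem.List.pyGetD positions i 0, PySem.List.pyGetD positions j 0)]
      else pairs) pairs) []

-- ===== PORT B =====
-- the while loop of Source B: state = (pairs, rest); each step peels the head of rest
def pvAltGo (min_distance : Int) (max_distance : Int) (pairs : List (Int × Int)) : List Int → List (Int × Int)
  | [] => pairs
  | p :: rest =>
      pvAltGo min_distance max_distance
        (pairs ++ (rest.filter (fun q => decide (min_distance ≤ q - p ∧ q - p ≤ max_distance))).map (fun q => (p, q)))
        rest

def find_distant_pairs_alt (positions : List Int) (min_distance : Int) (max_distance : Int) : List (Int × Int) :=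
  pvAltGo min_distance max_distance [] positions

-- ===== PRECONDITION & SPEC =====
def Spec_find_distant_pairs (positions : List Int) (min_distance : Int) (max_distance : Int) (out : List (Int × Int)) : Prop := out = find_distant_pairs_alt positions min_distance max_distance
instance (positions : List Int) (min_distance : Int) (max_distance : Int) (out : List (Int × Int)) : Decidable (Spec_find_distant_pairs positions min_distance max_distance out) := by unfold Spec_find_distant_pairs; infer_instance

-- ===== CLAIM (what is proved, stated in full; the proofs are below) =====
def Claim_equal_find_distant_pairs : Prop := ∀ (positions : List Int) (min_distance : Int) (max_distance : Int), Dom_find_distant_pairs positions min_distance max_distance → Spec_find_distant_pairs positions min_distance max_distance (find_distant_pairs positions min_distance max_distance)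

-- ===== LEMMAS AND PROOFS =====

-- A's inner loop, once the range indexing is resolved, appends the filtered, mapped suffix
theorem pv_inner_fold (mind maxd pi : Int) (xs : List Int) (acc : List (Int × Int)) :
    xs.foldl (fun acc q => if mind ≤ q - pi ∧ q - pi ≤ maxd then acc ++ [(pi, q)] else acc) acc
      = acc ++ (xs.filter (fun q => decide (mind ≤ q - pi ∧ q - pi ≤ maxd))).map (fun q => (pi, q)) := by
  induction xs generalizing acc with
  | nil => simp
  | cons q qs ih =>
      by_cases h : mind ≤ q - pi ∧ q - pi ≤ maxd
      · rw [List.foldl_cons, if_pos h, ih, List.filter_cons_of_pos (by simpa using h), List.map_cons]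
        simp
      · rw [List.foldl_cons, if_neg h, ih, List.filter_cons_of_neg (by simpa using h)]

-- reindexing step: the outer loop over indices 1..len on (p :: rest) is the loop over 0..len-1 on rest
theorem pv_shift (mind maxd : Int) (p : Int) (rest : List Int) (init : List (Int × Int)) :
    (PySem.List.pyRange 1 ((rest.length : Int) + 1) 1).foldl
      (fun pairs i =>
        pairs ++ (((p :: rest).drop (i + 1).toNat).filter
            (fun q => decide (mind ≤ q - PySem.List.pyGetD (p :: rest) i 0 ∧ q - PySem.List.pyGetD (p :: rest) i 0 ≤ maxd))).map
          (fun q => (PySem.List.pyGetD (p :: rest) i 0, q)))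
      init
    = (PySem.List.pyRange 0 (rest.length : Int) 1).foldl
      (fun pairs i =>
        pairs ++ ((rest.drop (i + 1).toNat).filter
            (fun q => decide (mind ≤ q - PySem.List.pyGetD rest i 0 ∧ q - PySem.List.pyGetD rest i 0 ≤ maxd))).map
          (fun q => (PySem.List.pyGetD rest i 0, q)))
      init := by
  rw [PySem.List.pyRange_one 1 ((rest.length : Int) + 1), PySem.List.pyRange_one 0 (rest.length : Int)]
  have hn : ((rest.length : Int) + 1 - 1).toNat = rest.length := by omega
  have hn0 : ((rest.length : Int) - 0).toNat = rest.length := by omega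
  rw [hn, hn0, List.foldl_map, List.foldl_map]
  congr 1
  funext acc k
  have e1 : (1 : Int) + (k : Int) = ((k + 1 : Nat) : Int) := by push_cast; ring
  have e0 : (0 : Int) + (k : Int) = ((k : Nat) : Int) := by omega
  rw [e1, e0, PySem.List.pyGetD_natCast, PySem.List.pyGetD_natCast]
  have e2 : (((k + 1 : Nat) : Int) + 1).toNat = k + 1 + 1 := by omega
  have e3 : (((k : Nat) : Int) + 1).toNat = k + 1 := by omega
  rw [e2, e3]
  simp

-- A's outer loop, with each inner loop already in closed form, is B's suffix sweep
theorem pv_outer (mind maxd : Int) :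
    ∀ (xs : List Int) (pairs : List (Int × Int)),
      (PySem.List.pyRange 0 (xs.length : Int) 1).foldl
        (fun pairs i =>
          pairs ++ ((xs.drop (i + 1).toNat).filter
              (fun q => decide (mind ≤ q - PySem.List.pyGetD xs i 0 ∧ q - PySem.List.pyGetD xs i 0 ≤ maxd))).map
            (fun q => (PySem.List.pyGetD xs i 0, q)))
        pairs
      = pvAltGo mind maxd pairs xs := by
  intro xs
  induction xs with
  | nil => intro pairs; simp [PySem.List.pyRange_one_eq_nil, pvAltGo]
  | cons p rest ih =>
      intro pairs
      have hlen : (((p :: rest).length : Nat) : Int) = (rest.length : Int) + 1 := by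
        simp
      rw [hlen, PySem.List.pyRange_one_cons (by positivity), List.foldl_cons]
      have h0 : PySem.List.pyGetD (p :: rest) 0 0 = p := PySem.List.pyGetD_zero_cons p rest 0
      rw [h0]
      have hdrop0 : (p :: rest).drop ((0 : Int) + 1).toNat = rest := by simp
      rw [hdrop0]
      simp only [zero_add]
      rw [pv_shift mind maxd p rest]
      rw [ih]
      rfl

-- ===== VERDICT =====
theorem find_distant_pairs_spec : Claim_equal_find_distant_pairs := by
  intro positions mind maxd _
  unfold Spec_find_distant_pairs find_distant_pairs find_distant_pairs_alt
  refine Eq.trans ?_ (pv_outer mind maxd positions [])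
  apply PySem.List.foldl_congr_mem
  intro acc i hi
  have hi0 : (0 : Int) ≤ i := (PySem.List.mem_pyRange_one.mp hi).1
  have hinner := PySem.List.foldl_pyRange_pyGetD' positions 0
      (fun acc q =>
        if mind ≤ q - PySem.List.pyGetD positions i 0 ∧ q - PySem.List.pyGetD positions i 0 ≤ maxd then
          acc ++ [(PySem.List.pyGetD positions i 0, q)]
        else acc)
      acc (show (0 : Int) ≤ i + 1 by omega)
  exact hinner.trans (pv_inner_fold mind maxd (PySem.List.pyGetD positions i 0) _ acc)
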